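-- pv_equiv track=rewrite | github.com/GDP-123/bilhet | src/etl/functions_etl.py | extrai_blocos_mensagens
-- ===== SOURCE A (Python) =====
-- def extrai_blocos_mensagens(texto, palavra_chave, stop_last_keyword):
--     #encontrar todas as posições das ocorrências da palavra chave
--     pos = texto.find(palavra_chave)
--     stop_last = texto.find(stop_last_keyword)
--
--     # Retorna vazio se 'stop_last_keyword' não for encontrada
--     if stop_last == -1:
--         stop_last = len(texto)
--
--     posições = []
--     while pos != -1:
--         posições.append(pos)
--         pos = texto.find(palavra_chave, pos+1)
--
--     #caso não haja registros
--     if not posições: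
--         return ['No responsive records located']
--
--     #extrair substrings com base nas posições
--     blocos = []
--     for i in range(len(posições)):
--         start = posições[i]
--         end = posições[i+1] if i+1 < len(posições) else stop_last
--         blocos.append(texto[start:end])
--
--     return blocos
-- ===== SOURCE B (Python) =====
-- def extrai_blocos_mensagens(texto, palavra_chave, stop_last_keyword):
--     # single streaming pass: emit each block as soon as the next occurrence is known
--     stop_last = texto.find(stop_last_keyword)
--     if stop_last == -1:
--         stop_last = len(texto)
--
--     pos = texto.find(palavra_chave)
--     if pos == -1:
--         return ['No responsive records located']
--
--     blocos = []
--     while True: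
--         nxt = texto.find(palavra_chave, pos + 1)
--         blocos.append(texto[pos : nxt if nxt != -1 else stop_last])
--         if nxt == -1:
--             break
--         pos = nxt
--     return blocos
-- ===== Notes on version B (the rewrite author's own statement) =====
-- stated objective: simpler
-- what changed: Replaces A's two-phase scheme (materialise the full list of keyword positions, then a separate index-driven loop slicing between consecutive entries) with a single streaming loop that looks up the next occurrence and emits each block immediately, so no positions list exists.
import Mathlib
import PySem

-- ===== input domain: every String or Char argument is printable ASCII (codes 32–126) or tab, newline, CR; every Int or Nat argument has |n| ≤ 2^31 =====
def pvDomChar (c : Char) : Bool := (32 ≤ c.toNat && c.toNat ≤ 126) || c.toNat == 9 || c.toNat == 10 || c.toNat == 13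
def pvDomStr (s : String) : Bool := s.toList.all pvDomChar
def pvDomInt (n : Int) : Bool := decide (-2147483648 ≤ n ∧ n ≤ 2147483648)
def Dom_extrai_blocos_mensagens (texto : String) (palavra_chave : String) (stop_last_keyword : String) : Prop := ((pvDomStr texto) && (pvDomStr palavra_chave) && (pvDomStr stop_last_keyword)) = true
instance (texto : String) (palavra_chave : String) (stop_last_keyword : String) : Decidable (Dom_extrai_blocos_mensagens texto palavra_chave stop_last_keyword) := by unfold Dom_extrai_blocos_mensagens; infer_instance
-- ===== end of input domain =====

-- B replaces A's two-phase scheme (materialise all keyword positions, then slice by index)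
-- by one streaming loop that emits each block as soon as the next occurrence is found (objective: simpler, same cost).


-- ===== PORT A =====
-- A's while-loop collecting all occurrence positions; fuel = len(texto)+1 is a totality
-- guard only (pos strictly increases each step, so the loop ends before fuel runs out)
def pvPosLoop (texto palavra : String) : Nat → Int → List Int
  | 0, _ => []
  | fuel+1, pos =>
      if pos = -1 then []
      else pos :: pvPosLoop texto palavra fuel (PySem.Str.findFrom texto palavra (pos+1))

-- A's for-i-in-range slicing loop: texto[pos[i] : pos[i+1]] and stop_last for the last i
def pvBlocos (texto : String) (stop_last : Int) : List Int → List String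
  | [] => []
  | [p] => [PySem.Str.slice texto (some p) (some stop_last)]
  | p :: q :: rest => PySem.Str.slice texto (some p) (some q) :: pvBlocos texto stop_last (q :: rest)

def extrai_blocos_mensagens (texto : String) (palavra_chave : String) (stop_last_keyword : String) : List String :=
  let pos : Int := PySem.Str.find texto palavra_chave
  let stop_last0 : Int := PySem.Str.find texto stop_last_keyword
  let stop_last : Int := if stop_last0 = -1 then PySem.Str.len texto else stop_last0
  let posições : List Int := pvPosLoop texto palavra_chave (texto.toList.length + 1) pos
  if posições = [] then ["No responsive records located"]
  else pvBlocos texto stop_last posições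

-- ===== PORT B =====
-- B's do-while streaming loop; same fuel guard
def pvStream (texto palavra : String) (stop_last : Int) : Nat → Int → List String
  | 0, _ => []
  | fuel+1, pos =>
      let nxt : Int := PySem.Str.findFrom texto palavra (pos+1)
      PySem.Str.slice texto (some pos) (some (if nxt ≠ -1 then nxt else stop_last)) ::
        (if nxt = -1 then [] else pvStream texto palavra stop_last fuel nxt)

def extrai_blocos_mensagens_alt (texto : String) (palavra_chave : String) (stop_last_keyword : String) : List String :=
  let stop_last0 : Int := PySem.Str.find texto stop_last_keyword
  let stop_last : Int := if stop_last0 = -1 then PySem.Str.len texto else stop_last0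
  let pos : Int := PySem.Str.find texto palavra_chave
  if pos = -1 then ["No responsive records located"]
  else pvStream texto palavra_chave stop_last (texto.toList.length + 1) pos

-- ===== PRECONDITION & SPEC =====
def Spec_extrai_blocos_mensagens (texto : String) (palavra_chave : String) (stop_last_keyword : String) (out : List String) : Prop := out = extrai_blocos_mensagens_alt texto palavra_chave stop_last_keyword
instance (texto : String) (palavra_chave : String) (stop_last_keyword : String) (out : List String) : Decidable (Spec_extrai_blocos_mensagens texto palavra_chave stop_last_keyword out) := by unfold Spec_extrai_blocos_mensagens; infer_instance

-- ===== CLAIM (what is proved, stated in full; the proofs are below) =====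
def Claim_equal_extrai_blocos_mensagens : Prop := ∀ (texto : String) (palavra_chave : String) (stop_last_keyword : String), Dom_extrai_blocos_mensagens texto palavra_chave stop_last_keyword → Spec_extrai_blocos_mensagens texto palavra_chave stop_last_keyword (extrai_blocos_mensagens texto palavra_chave stop_last_keyword)

-- ===== LEMMAS AND PROOFS =====

-- CPython quirk, from PySem's definition: a start past len(s) finds nothing (even for '')
theorem pvFindFrom_gt_len (s sub : List Char) (k : Int) (h : (s.length : Int) < k) :
    PySem.Chars.findFrom s sub k none = -1 := by
  simp only [PySem.Chars.findFrom]
  split_ifs with h1 h2 h3 h4 <;> omega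

-- a successful findFrom from start pos+1 (0 ≤ pos ≤ len) lands in (pos, len]
theorem pvFindFrom_bounds (texto palavra : String) (pos : Int)
    (h0 : 0 ≤ pos) (h1 : pos ≤ PySem.Str.len texto)
    (hne : PySem.Str.findFrom texto palavra (pos+1) ≠ -1) :
    pos + 1 ≤ PySem.Str.findFrom texto palavra (pos+1) ∧
      PySem.Str.findFrom texto palavra (pos+1) ≤ PySem.Str.len texto := by
  simp only [PySem.Str.findFrom_eq, PySem.Str.len] at *
  set L := texto.toList
  by_cases hk : pos + 1 ≤ (L.length : Int)
  · have hkn : ((pos+1).toNat : Int) = pos + 1 := Int.toNat_of_nonneg (by omega)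
    have hkle : (pos+1).toNat ≤ L.length := by omega
    rw [← hkn] at hne ⊢
    have hval := PySem.Chars.findFrom_natCast L palavra.toList (pos+1).toNat hkle
    rw [hval] at hne ⊢
    split_ifs at hne ⊢ with hf
    · exact absurd rfl hne
    · have hge : (0:Int) ≤ PySem.Chars.find (L.drop (pos+1).toNat) palavra.toList := by
        have := PySem.Chars.neg_one_le_find (L.drop (pos+1).toNat) palavra.toList
        omega
      have hle := PySem.Chars.find_le_length (L.drop (pos+1).toNat) palavra.toList
      simp only [List.length_drop] at hle
      constructor <;> push_cast at * <;> omega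
  · exfalso
    exact hne (pvFindFrom_gt_len L palavra.toList (pos+1) (by omega))
-- the position loop at pos = -1 yields nothing
theorem pvPosLoop_neg_one (texto palavra : String) (fuel : Nat) :
    pvPosLoop texto palavra fuel (-1) = [] := by
  cases fuel <;> simp [pvPosLoop]

-- core: with adequate fuel, slicing A's position list = B's streaming loop
theorem pvBlocos_posLoop_eq_stream (texto palavra : String) (stop_last : Int) (fuel : Nat) :
    ∀ pos : Int, 0 ≤ pos → pos ≤ PySem.Str.len texto →
      PySem.Str.len texto - pos < fuel →
      pvBlocos texto stop_last (pvPosLoop texto palavra fuel pos) =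
        pvStream texto palavra stop_last fuel pos := by
  induction fuel with
  | zero => intro pos h0 h1 hf; omega
  | succ f ih =>
    intro pos h0 h1 hf
    have hpos : pos ≠ -1 := by omega
    simp only [pvPosLoop, pvStream, hpos, if_false]
    set nxt := PySem.Str.findFrom texto palavra (pos+1) with hnxt
    by_cases hn : nxt = -1
    · simp [hn, pvPosLoop_neg_one, pvBlocos]
    · obtain ⟨hlo, hhi⟩ := pvFindFrom_bounds texto palavra pos h0 h1 hn
      have hf' : PySem.Str.len texto - nxt < f := by omega
      obtain ⟨f', rfl⟩ : ∃ f', f = f' + 1 := ⟨f - 1, by omega⟩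
      have ihr := ih nxt (by omega) hhi hf'
      simp only [pvPosLoop, hn, if_false] at ihr ⊢
      have step : pvBlocos texto stop_last
          (pos :: nxt :: pvPosLoop texto palavra f' (PySem.Str.findFrom texto palavra (nxt+1))) =
          PySem.Str.slice texto (some pos) (some nxt) ::
            pvBlocos texto stop_last
              (nxt :: pvPosLoop texto palavra f' (PySem.Str.findFrom texto palavra (nxt+1))) := rfl
      rw [step, ihr, if_pos hn]

-- ===== VERDICT (by name: the statement is the Claim_ definition above) =====
theorem extrai_blocos_mensagens_spec : Claim_equal_extrai_blocos_mensagens := by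
  intro texto palavra_chave stop_last_keyword _
  unfold Spec_extrai_blocos_mensagens extrai_blocos_mensagens extrai_blocos_mensagens_alt
  set pos := PySem.Str.find texto palavra_chave with hpos
  by_cases h : pos = -1
  · simp [h, pvPosLoop_neg_one]
  · have h0 : 0 ≤ pos := by
      have := PySem.Str.find_nonneg_iff (s := texto) (sub := palavra_chave)
      have hge : -1 ≤ pos := by
        rw [hpos]; simp only [PySem.Str.find]
        exact PySem.Chars.neg_one_le_find _ _
      omega
    have h1 : pos ≤ PySem.Str.len texto := by
      rw [hpos]; simp only [PySem.Str.find, PySem.Str.len]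
      exact PySem.Chars.find_le_length _ _
    have key := pvBlocos_posLoop_eq_stream texto palavra_chave
      (if PySem.Str.find texto stop_last_keyword = -1 then PySem.Str.len texto
        else PySem.Str.find texto stop_last_keyword)
      (texto.toList.length + 1) pos h0 h1 (by simp only [PySem.Str.len]; push_cast; omega)
    have hne : pvPosLoop texto palavra_chave (texto.toList.length + 1) pos ≠ [] := by
      simp [pvPosLoop, h]
    simp only [h, if_false, if_neg hne, key]
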